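-- pv_equiv track=rewrite | github.com/mrsgzg/Ball_counting_CNN | DataLoader_single_image.py | _find_keyframes
-- ===== SOURCE A (Python) =====
-- def _find_keyframes(frames):
--     """找到关键帧（计数发生变化的帧）"""
--     keyframes = [0]  # 总是包含第一帧
--
--     prev_count = frames[0].get('label', 0)
--     for i, frame in enumerate(frames[1:], 1):
--         current_count = frame.get('label', 0)
--         if current_count != prev_count:
--             keyframes.append(i)
--             prev_count = current_count
--
--     # 总是包含最后一帧
--     if len(frames) - 1 not in keyframes:
--         keyframes.append(len(frames) - 1)
--
--     return keyframes
-- ===== SOURCE B (Python) =====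
-- def _split_run(labels):
--     """Split off the leading run of equal labels: (run length, remaining labels)."""
--     v = labels[0]
--     run = 1
--     rest = labels[1:]
--     while rest and rest[0] == v:
--         run += 1
--         rest = rest[1:]
--     return run, rest
--
--
-- def _find_keyframes(frames):
--     """Run-length decomposition: a keyframe is the start of each run of equal labels, plus the last frame."""
--     labels = [f.get('label', 0) for f in frames]
--     starts = []
--     idx = 0
--     rest = labels
--     while rest:
--         starts.append(idx)
--         run, rest = _split_run(rest)
--         idx += run
--     if starts[-1] != len(frames) - 1:
--         starts.append(len(frames) - 1)
--     return starts
-- ===== Notes on version B (the rewrite author's own statement) =====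
-- stated objective: alternative
-- what changed: B replaces A's stateful change-scan (running prev_count, membership test on the result list) by a run-length decomposition: an outer loop repeatedly splits off the leading run of equal labels with a helper and records each run's start index, then compares only the final element starts[-1] with len(frames)-1 instead of scanning the list.
import Mathlib
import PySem

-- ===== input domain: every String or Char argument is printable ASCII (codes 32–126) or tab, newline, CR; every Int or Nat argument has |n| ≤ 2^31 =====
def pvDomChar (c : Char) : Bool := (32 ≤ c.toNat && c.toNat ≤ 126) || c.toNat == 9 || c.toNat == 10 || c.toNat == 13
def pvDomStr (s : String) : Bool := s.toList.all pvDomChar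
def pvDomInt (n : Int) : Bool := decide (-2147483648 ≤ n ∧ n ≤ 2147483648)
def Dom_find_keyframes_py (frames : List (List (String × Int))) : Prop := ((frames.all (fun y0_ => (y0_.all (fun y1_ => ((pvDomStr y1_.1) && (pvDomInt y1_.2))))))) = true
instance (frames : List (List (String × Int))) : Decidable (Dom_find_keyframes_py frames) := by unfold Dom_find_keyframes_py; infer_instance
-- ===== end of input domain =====

-- B replaces A's stateful change-scan by a run-length decomposition (split off each run of
-- equal labels, record its start index) with a last-element check instead of a membership scan
-- (objective: alternative decomposition, same cost).

-- frame.get('label', 0)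
def pvLabel (f : List (String × Int)) : Int := (PySem.Dict.mk f).getD "label" 0

-- ===== PORT A =====
-- A's for-loop over enumerate(frames[1:], 1), state = (keyframes, prev_count), counter i carried explicitly
def pvALoop (fs : List (List (String × Int))) (i : Nat) (keyframes : List Int) (prev : Int) : List Int :=
  match fs with
  | [] => keyframes
  | frame :: rest =>
    let current := pvLabel frame
    if current ≠ prev then pvALoop rest (i + 1) (keyframes ++ [(i : Int)]) current
    else pvALoop rest (i + 1) keyframes prev

def find_keyframes_py (frames : List (List (String × Int))) : List Int :=
  match frames with
  | [] => []  -- Python raises IndexError here (frames[0]); excluded by Pre_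
  | f0 :: rest =>
    let keyframes := pvALoop rest 1 [0] (pvLabel f0)
    let last : Int := (frames.length : Int) - 1
    if last ∈ keyframes then keyframes else keyframes ++ [last]

-- ===== PORT B =====
-- _split_run's while loop: state = (run, rest), v fixed
def pvSplitRunLoop (v : Int) (run : Nat) (rest : List Int) : Nat × List Int :=
  match rest with
  | [] => (run, [])
  | x :: r => if x = v then pvSplitRunLoop v (run + 1) r else (run, x :: r)

-- termination measure for the outer while loop (the remaining label list shrinks)
theorem pvSplitRunLoop_len (v : Int) : ∀ (rest : List Int) (run : Nat),
    ((pvSplitRunLoop v run rest).2).length ≤ rest.length := by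
  intro rest
  induction rest with
  | nil => intro run; simp [pvSplitRunLoop]
  | cons x r ih =>
    intro run
    by_cases h : x = v
    · simp only [pvSplitRunLoop, h]
      exact le_trans (ih _) (Nat.le_succ _)
    · simp [pvSplitRunLoop, h]

-- B's outer while loop: state = (starts, idx, rest)
def pvBOuter (idx : Nat) (rest : List Int) (starts : List Int) : List Int :=
  match rest with
  | [] => starts
  | v :: r =>
    let p := pvSplitRunLoop v 1 r
    pvBOuter (idx + p.1) p.2 (starts ++ [(idx : Int)])
termination_by rest.length
decreasing_by simpa using Nat.lt_succ_of_le (pvSplitRunLoop_len v r 1)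

def find_keyframes_py_alt (frames : List (List (String × Int))) : List Int :=
  let labels := frames.map pvLabel
  let starts := pvBOuter 0 labels []
  let last : Int := (frames.length : Int) - 1
  match starts.getLast? with
  | none => starts  -- Python raises IndexError here (starts[-1] on empty input); excluded by Pre_
  | some g => if g ≠ last then starts ++ [last] else starts

-- ===== PRECONDITION & SPEC =====
-- Pre_ excludes only the empty list, on which both Pythons raise IndexError.
def Pre_find_keyframes_py (frames : List (List (String × Int))) : Prop := frames ≠ []
instance (frames : List (List (String × Int))) : Decidable (Pre_find_keyframes_py frames) := by unfold Pre_find_keyframes_py; infer_instance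
def pvWitness_find_keyframes_py : (List (List (String × Int))) := [[("label", 1)], [("label", 2)]]

def Spec_find_keyframes_py (frames : List (List (String × Int))) (out : List Int) : Prop := out = find_keyframes_py_alt frames
instance (frames : List (List (String × Int))) (out : List Int) : Decidable (Spec_find_keyframes_py frames out) := by unfold Spec_find_keyframes_py; infer_instance

-- ===== CLAIM (what is proved, stated in full; the proofs are below) =====
def Claim_equal_find_keyframes_py : Prop := ∀ (frames : List (List (String × Int))), Dom_find_keyframes_py frames → Pre_find_keyframes_py frames → Spec_find_keyframes_py frames (find_keyframes_py frames)

-- ===== LEMMAS AND PROOFS =====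

-- common characterisation: the indices (from i on) where the label changes, with running previous value
def pvChg (prev : Int) (ls : List Int) (i : Nat) : List Int :=
  match ls with
  | [] => []
  | x :: r => if x = prev then pvChg prev r (i + 1) else (i : Int) :: pvChg x r (i + 1)

theorem pvALoop_char : ∀ (fs : List (List (String × Int))) (prev : Int) (i : Nat) (acc : List Int),
    pvALoop fs i acc prev = acc ++ pvChg prev (fs.map pvLabel) i := by
  intro fs
  induction fs with
  | nil => intro prev i acc; simp [pvALoop, pvChg]
  | cons f r ih =>
    intro prev i acc
    by_cases h : pvLabel f = prev
    · simp [pvALoop, pvChg, h, ih]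
    · simp [pvALoop, pvChg, h, ih, List.append_assoc]

-- splitting off the leading run preserves the change list (the skipped labels equal v)
theorem pvSR (v : Int) : ∀ (ls : List Int) (run j : Nat),
    pvChg v ls (j + run) = pvChg v (pvSplitRunLoop v run ls).2 (j + (pvSplitRunLoop v run ls).1) ∧
    (∀ w r, (pvSplitRunLoop v run ls).2 = w :: r → w ≠ v) := by
  intro ls
  induction ls with
  | nil => intro run j; simp [pvSplitRunLoop]
  | cons x r ih =>
    intro run j
    by_cases h : x = v
    · simp only [pvSplitRunLoop, h, pvChg]
      have := ih (run + 1) j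
      constructor
      · have e : j + run + 1 = j + (run + 1) := by omega
        rw [e]; exact this.1
      · exact this.2
    · refine ⟨?_, fun w r' hw => ?_⟩
      · simp [pvSplitRunLoop, h]
      · simp only [pvSplitRunLoop, if_neg h] at hw
        injection hw with h1 _
        exact h1 ▸ h

theorem pvBOuter_char : ∀ (n : Nat) (ls : List Int), ls.length ≤ n → ∀ (v : Int) (idx : Nat) (acc : List Int),
    pvBOuter idx (v :: ls) acc = acc ++ (idx : Int) :: pvChg v ls (idx + 1) := by
  intro n
  induction n with
  | zero =>
    intro ls hl v idx acc
    have : ls = [] := List.eq_nil_of_length_eq_zero (Nat.le_zero.mp hl)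
    subst this
    simp [pvBOuter, pvSplitRunLoop, pvChg]
  | succ m ih =>
    intro ls hl v idx acc
    rw [pvBOuter]
    have hsr := pvSR v ls 1 idx
    rcases hp : (pvSplitRunLoop v 1 ls).2 with _ | ⟨w, r⟩
    · -- remaining list empty: the whole ls was one run of v's
      have hc : pvChg v ls (idx + 1) = [] := by
        have := hsr.1; rw [hp] at this; simpa [pvChg] using this
      simp [pvBOuter, hc]
    · -- remaining list starts with w ≠ v
      have hw : w ≠ v := hsr.2 w r hp
      have hr : r.length ≤ m := by
        have := pvSplitRunLoop_len v ls 1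
        rw [hp] at this; simp at this; omega
      have hc : pvChg v ls (idx + 1) =
          ((idx + (pvSplitRunLoop v 1 ls).1 : Nat) : Int) :: pvChg w r (idx + (pvSplitRunLoop v 1 ls).1 + 1) := by
        have := hsr.1; rw [hp] at this; simpa [pvChg, hw] using this
      rw [hp] at *
      rw [ih r hr w (idx + (pvSplitRunLoop v 1 ls).1) (acc ++ [(idx : Int)])]
      simp [hc, List.append_assoc]

-- every change index lies in [i, i + length)
theorem pvChg_bound : ∀ (ls : List Int) (prev : Int) (i : Nat),
    ∀ x ∈ pvChg prev ls i, (i : Int) ≤ x ∧ x < (i : Int) + ls.length := by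
  intro ls
  induction ls with
  | nil => intro prev i x hx; simp [pvChg] at hx
  | cons y r ih =>
    intro prev i x hx
    by_cases h : y = prev
    · simp only [pvChg, h] at hx
      have := ih prev (i + 1) x hx
      push_cast at this ⊢
      constructor
      · omega
      · simp only [List.length_cons]; push_cast; omega
    · simp only [pvChg, if_neg h, List.mem_cons] at hx
      rcases hx with hx | hx
      · subst hx
        refine ⟨le_refl _, ?_⟩
        simp only [List.length_cons]; push_cast; omega
      · have := ih y (i + 1) x hx
        push_cast at this ⊢
        constructor
        · omega
        · simp only [List.length_cons]; push_cast; omega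

theorem pvChg_chain : ∀ (ls : List Int) (prev : Int) (i : Nat),
    (pvChg prev ls i).IsChain (· < ·) := by
  intro ls
  induction ls with
  | nil => intro prev i; simp [pvChg]
  | cons y r ih =>
    intro prev i
    by_cases h : y = prev
    · simp only [pvChg, h]; exact ih prev (i + 1)
    · simp only [pvChg, if_neg h]
      refine List.isChain_cons.mpr ⟨?_, ih y (i + 1)⟩
      intro z hz
      have hm : z ∈ pvChg y r (i + 1) := List.mem_of_mem_head? hz
      have := (pvChg_bound r y (i + 1) z hm).1
      push_cast at this ⊢; omega

-- in a strictly increasing list whose elements are all ≤ t, membership of t means t is the last element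
theorem getLast?_of_mem_chain : ∀ (l : List Int) (t : Int),
    l.IsChain (· < ·) → (∀ x ∈ l, x ≤ t) → t ∈ l → l.getLast? = some t := by
  intro l
  induction l with
  | nil => intro t _ _ ht; simp at ht
  | cons x r ih =>
    intro t hch hb ht
    match r with
    | [] =>
      simp only [List.mem_singleton] at ht; simp [ht]
    | y :: r' =>
      have hxy : x < y := (List.isChain_cons_cons.mp hch).1
      have hch' : (y :: r').IsChain (· < ·) := (List.isChain_cons_cons.mp hch).2
      have ht' : t ∈ y :: r' := by
        rcases List.mem_cons.mp ht with hx | hx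
        · exfalso
          have hy : y ≤ t := hb y (by simp)
          omega
        · exact hx
      rw [List.getLast?_cons_cons]
      exact ih t hch' (fun z hz => hb z (List.mem_cons_of_mem x hz)) ht'

theorem find_keyframes_py_spec : Claim_equal_find_keyframes_py := by
  intro frames _ hpre
  unfold Spec_find_keyframes_py
  match frames with
  | [] => exact absurd rfl hpre
  | f0 :: rest =>
    show find_keyframes_py (f0 :: rest) = find_keyframes_py_alt (f0 :: rest)
    simp only [find_keyframes_py, find_keyframes_py_alt, List.map_cons]
    rw [pvALoop_char rest (pvLabel f0) 1 [0],
        pvBOuter_char (rest.map pvLabel).length (rest.map pvLabel) le_rfl (pvLabel f0) 0 []]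
    simp only [List.nil_append, List.singleton_append, Nat.cast_zero, Nat.zero_add]
    set K : List Int := (0 : Int) :: pvChg (pvLabel f0) (rest.map pvLabel) 1 with hK
    set last : Int := ((f0 :: rest).length : Int) - 1 with hlast
    have hlast' : last = (rest.length : Int) := by
      rw [hlast]; simp only [List.length_cons]; push_cast; omega
    have hch : K.IsChain (· < ·) := by
      refine List.isChain_cons.mpr ⟨?_, pvChg_chain _ _ _⟩
      intro z hz
      have hm := List.mem_of_mem_head? hz
      have := (pvChg_bound (rest.map pvLabel) (pvLabel f0) 1 z hm).1
      omega
    have hb : ∀ x ∈ K, x ≤ last := by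
      intro x hx
      rw [hK] at hx
      rcases List.mem_cons.mp hx with hx | hx
      · rw [hlast', hx]; positivity
      · have := (pvChg_bound (rest.map pvLabel) (pvLabel f0) 1 x hx).2
        rw [hlast']; simp at this; omega
    by_cases hmem : last ∈ K
    · have hgl := getLast?_of_mem_chain K last hch hb hmem
      simp [hmem, hgl]
    · have hne : K ≠ [] := by simp [hK]
      rcases hg : K.getLast? with _ | g
      · exact absurd (List.getLast?_eq_none_iff.mp hg) hne
      · have hgm : g ∈ K := List.mem_of_getLast? hg
        have hgt : g ≠ last := fun h => hmem (h ▸ hgm)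
        simp [hmem, hgt]
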